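-- pv_equiv track=rewrite | github.com/cgcardona/muse | maestro/muse_cli/commands/status.py | _status_entries
-- ===== SOURCE A (Python) =====
-- def _status_entries(
--     added: set[str],
--     modified: set[str],
--     deleted: set[str],
--     untracked: set[str],
-- ) -> list[tuple[str, str]]:
--     """Return a sorted list of (status_type, path) pairs.
--
--     Ordering: modified first, then added, deleted, untracked — mirroring
--     git's display convention of most-relevant changes first.
--     """
--     entries: list[tuple[str, str]] = []
--     for path in sorted(modified):
--         entries.append(("modified", path))
--     for path in sorted(added):
--         entries.append(("added", path))
--     for path in sorted(deleted):
--         entries.append(("deleted", path))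
--     for path in sorted(untracked):
--         entries.append(("untracked", path))
--     return entries
-- ===== SOURCE B (Python) =====
-- def _status_entries(
--     added: set[str],
--     modified: set[str],
--     deleted: set[str],
--     untracked: set[str],
-- ) -> list[tuple[str, str]]:
--     """Single combined build + one composite-key sort instead of four
--     per-group sorts with concatenation."""
--     tagged = [
--         (rank, label, path)
--         for rank, (label, group) in enumerate(
--             [("modified", modified), ("added", added), ("deleted", deleted), ("untracked", untracked)]
--         )
--         for path in group
--     ]
--     tagged.sort(key=lambda t: (t[0], t[2]))
--     return [(label, path) for _rank, label, path in tagged]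
-- ===== Notes on version B (the rewrite author's own statement) =====
-- stated objective: alternative
-- what changed: B tags every path with an integer rank for its group in one combined pass and performs a single stable sort on the composite key (rank, path), instead of A's four separate per-group sorts concatenated in a fixed order.
import Mathlib
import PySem

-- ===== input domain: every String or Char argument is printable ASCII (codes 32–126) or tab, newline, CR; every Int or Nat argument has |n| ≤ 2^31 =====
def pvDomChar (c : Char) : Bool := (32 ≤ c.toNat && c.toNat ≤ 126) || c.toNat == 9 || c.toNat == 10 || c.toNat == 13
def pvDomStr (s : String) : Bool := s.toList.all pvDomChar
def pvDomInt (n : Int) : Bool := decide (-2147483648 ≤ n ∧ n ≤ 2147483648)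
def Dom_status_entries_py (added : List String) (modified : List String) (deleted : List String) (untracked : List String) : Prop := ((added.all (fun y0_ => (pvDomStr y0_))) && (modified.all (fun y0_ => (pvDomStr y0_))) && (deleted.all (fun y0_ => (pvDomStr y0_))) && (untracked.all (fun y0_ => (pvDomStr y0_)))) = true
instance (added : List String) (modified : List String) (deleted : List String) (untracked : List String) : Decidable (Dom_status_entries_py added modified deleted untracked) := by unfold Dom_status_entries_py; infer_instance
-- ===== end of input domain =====

-- B replaces A's four per-group sorts + concatenation by one tagged build and a single
-- composite-key (rank, path) sort; proved equal on lists of distinct paths (Python sets).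


-- ===== PORT A =====
def status_entries_py (added : List String) (modified : List String) (deleted : List String) (untracked : List String) : List (String × String) :=
  let entries : List (String × String) := []
  let entries := (PySem.List.sorted modified (fun x => x)).foldl (fun acc path => acc ++ [("modified", path)]) entries
  let entries := (PySem.List.sorted added (fun x => x)).foldl (fun acc path => acc ++ [("added", path)]) entries
  let entries := (PySem.List.sorted deleted (fun x => x)).foldl (fun acc path => acc ++ [("deleted", path)]) entries
  let entries := (PySem.List.sorted untracked (fun x => x)).foldl (fun acc path => acc ++ [("untracked", path)]) entries
  entries

-- ===== PORT B =====
def status_entries_py_alt (added : List String) (modified : List String) (deleted : List String) (untracked : List String) : List (String × String) :=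
  let tagged : List (Int × String × String) :=
    (PySem.List.enumerate [("modified", modified), ("added", added), ("deleted", deleted), ("untracked", untracked)]).flatMap
      (fun rg => rg.2.2.map (fun path => (rg.1, rg.2.1, path)))
  let sortedTagged := PySem.List.sorted2 tagged (fun t => t.1) (fun t => t.2.2)
  sortedTagged.map (fun t => (t.2.1, t.2.2))

-- ===== PRECONDITION & SPEC =====
-- The Python arguments are sets of strings; under the type convention each is a list of
-- DISTINCT elements, so Pre_ requires exactly that (a list with duplicates encodes no set).
def Pre_status_entries_py (added : List String) (modified : List String) (deleted : List String) (untracked : List String) : Prop :=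
  added.Nodup ∧ modified.Nodup ∧ deleted.Nodup ∧ untracked.Nodup
instance (added : List String) (modified : List String) (deleted : List String) (untracked : List String) : Decidable (Pre_status_entries_py added modified deleted untracked) := by unfold Pre_status_entries_py; infer_instance
def pvWitness_status_entries_py : List String × List String × List String × List String := (["a.txt"], ["b.txt", "a.txt"], [], ["z"])
def Spec_status_entries_py (added : List String) (modified : List String) (deleted : List String) (untracked : List String) (out : List (String × String)) : Prop := out = status_entries_py_alt added modified deleted untracked
instance (added : List String) (modified : List String) (deleted : List String) (untracked : List String) (out : List (String × String)) : Decidable (Spec_status_entries_py added modified deleted untracked out) := by unfold Spec_status_entries_py; infer_instance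

-- ===== CLAIM (what is proved, stated in full; the proofs are below) =====
def Claim_equal_status_entries_py : Prop := ∀ (added : List String) (modified : List String) (deleted : List String) (untracked : List String), Dom_status_entries_py added modified deleted untracked → Pre_status_entries_py added modified deleted untracked → Spec_status_entries_py added modified deleted untracked (status_entries_py added modified deleted untracked)

-- ===== LEMMAS AND PROOFS =====

-- sorted2 (tuple key) is sorted with the lexicographic key.
lemma sorted2_eq_sorted_lex {α : Type} (xs : List α) (k1 : α → Int) (k2 : α → String) :
    PySem.List.sorted2 xs k1 k2 = PySem.List.sorted xs (fun x => toLex (k1 x, k2 x)) := by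
  have hb : (fun a b : α => decide (k1 a < k1 b) || (!decide (k1 b < k1 a) && decide (k2 a < k2 b)))
      = (fun a b : α => decide ((toLex (k1 a, k2 a) : Lex (Int × String)) < toLex (k1 b, k2 b))) := by
    funext a b
    rcases lt_trichotomy (k1 a) (k1 b) with h | h | h
    · simp [Prod.Lex.lt_iff, h]
    · simp [Prod.Lex.lt_iff, h]
    · simp [Prod.Lex.lt_iff, not_lt_of_gt h, ne_of_gt h, h]
  unfold PySem.List.sorted2
  show List.foldl (fun acc x => PySem.List.insertBy
      (fun a b => decide (k1 a < k1 b) || (!decide (k1 b < k1 a) && decide (k2 a < k2 b))) x acc) [] xs = _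
  rw [hb, ← PySem.List.sorted_eq_foldl_insertBy]

-- strict pairwise for a sorted duplicate-free list
lemma sorted_pairwise_lt_of_nodup (l : List String) (h : l.Nodup) :
    (PySem.List.sorted l (fun x => x)).Pairwise (· < ·) := by
  have h1 := PySem.List.sorted_pairwise l (fun x => x)
  have h2 : (PySem.List.sorted l (fun x => x)).Nodup :=
    ((PySem.List.sorted_perm l (fun x => x) false).nodup_iff).mpr h
  exact (h1.and h2).imp (fun hab => lt_of_le_of_ne hab.1 hab.2)

lemma pairwise_lt_tag (r : Int) (lab : String) (l : List String) (h : l.Nodup) :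
    ((PySem.List.sorted l (fun x => x)).map (fun p => (r, lab, p))).Pairwise
      (fun a b => (toLex (a.1, a.2.2) : Lex (Int × String)) < toLex (b.1, b.2.2)) := by
  rw [List.pairwise_map]
  refine (sorted_pairwise_lt_of_nodup l h).imp ?_
  intro a b hab
  exact Prod.Lex.lt_iff.mpr (Or.inr ⟨rfl, hab⟩)

theorem status_entries_py_spec : Claim_equal_status_entries_py := by
  intro added modified deleted untracked _ hpre
  obtain ⟨ha, hm, hd, hu⟩ := hpre
  unfold Spec_status_entries_py status_entries_py status_entries_py_alt
  simp only [PySem.List.foldl_append_singleton_eq_map, List.nil_append]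
  rw [sorted2_eq_sorted_lex]
  have htag :
      ((PySem.List.enumerate [("modified", modified), ("added", added), ("deleted", deleted), ("untracked", untracked)]).flatMap
        (fun rg => rg.2.2.map (fun path => (rg.1, rg.2.1, path))))
      = modified.map (fun p => ((0 : Int), "modified", p)) ++ added.map (fun p => ((1 : Int), "added", p))
        ++ deleted.map (fun p => ((2 : Int), "deleted", p)) ++ untracked.map (fun p => ((3 : Int), "untracked", p)) := by
    simp [PySem.List.enumerate]
  rw [htag]
  set T : List (Int × String × String) :=
    (PySem.List.sorted modified (fun x => x)).map (fun p => ((0 : Int), "modified", p))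
    ++ (PySem.List.sorted added (fun x => x)).map (fun p => ((1 : Int), "added", p))
    ++ (PySem.List.sorted deleted (fun x => x)).map (fun p => ((2 : Int), "deleted", p))
    ++ (PySem.List.sorted untracked (fun x => x)).map (fun p => ((3 : Int), "untracked", p)) with hT
  have hperm : T.Perm (modified.map (fun p => ((0 : Int), "modified", p)) ++ added.map (fun p => ((1 : Int), "added", p))
      ++ deleted.map (fun p => ((2 : Int), "deleted", p)) ++ untracked.map (fun p => ((3 : Int), "untracked", p))) := by
    exact ((((PySem.List.sorted_perm modified (fun x => x) false).map _).append
      ((PySem.List.sorted_perm added (fun x => x) false).map _)).append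
      ((PySem.List.sorted_perm deleted (fun x => x) false).map _)).append
      ((PySem.List.sorted_perm untracked (fun x => x) false).map _)
  have hpair : T.Pairwise (fun a b => (toLex (a.1, a.2.2) : Lex (Int × String)) < toLex (b.1, b.2.2)) := by
    rw [hT]
    have rank_lt : ∀ x y : Int × String × String, x.1 < y.1 →
        (toLex (x.1, x.2.2) : Lex (Int × String)) < toLex (y.1, y.2.2) :=
      fun x y h => Prod.Lex.lt_iff.mpr (Or.inl h)
    have rk : ∀ (r : Int) (lab : String) (l : List String) (x : Int × String × String),
        x ∈ (PySem.List.sorted l (fun s => s)).map (fun p => (r, lab, p)) → x.1 = r := by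
      intro r lab l x hx
      simp only [List.mem_map] at hx
      obtain ⟨p, _, rfl⟩ := hx; rfl
    refine List.pairwise_append.mpr ⟨List.pairwise_append.mpr ⟨List.pairwise_append.mpr
      ⟨pairwise_lt_tag 0 "modified" modified hm, pairwise_lt_tag 1 "added" added ha, ?_⟩,
      pairwise_lt_tag 2 "deleted" deleted hd, ?_⟩, pairwise_lt_tag 3 "untracked" untracked hu, ?_⟩
    · intro x hx y hy
      exact rank_lt x y (by rw [rk 0 _ _ x hx, rk 1 _ _ y hy]; norm_num)
    · intro x hx y hy
      refine rank_lt x y ?_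
      have hy2 := rk 2 _ _ y hy
      rcases List.mem_append.mp hx with hx | hx
      · rw [rk 0 _ _ x hx, hy2]; norm_num
      · rw [rk 1 _ _ x hx, hy2]; norm_num
    · intro x hx y hy
      refine rank_lt x y ?_
      have hy2 := rk 3 _ _ y hy
      rcases List.mem_append.mp hx with hx | hx
      · rcases List.mem_append.mp hx with hx | hx
        · rw [rk 0 _ _ x hx, hy2]; norm_num
        · rw [rk 1 _ _ x hx, hy2]; norm_num
      · rw [rk 2 _ _ x hx, hy2]; norm_num
  rw [PySem.List.sorted_eq_of_perm_of_pairwise_lt _ T _ hperm hpair]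
  rw [hT]
  simp [Function.comp_def]

-- ===== VERDICT (by name: the statement is the Claim_ definition above) =====
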